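-- pv_equiv track=rewrite | github.com/thomasjjj/Minab_Girls_School_OSM_Analysis | audit_pipeline.py | diff_tags
-- ===== SOURCE A (Python) =====
-- def diff_tags(previous_tags, current_tags):
--     if previous_tags is None:
--         return [f"+ {key}={value}" for key, value in sorted(current_tags.items())]
--
--     changes = []
--     previous_keys = set(previous_tags)
--     current_keys = set(current_tags)
--
--     for key in sorted(current_keys - previous_keys):
--         changes.append(f"+ {key}={current_tags[key]}")
--     for key in sorted(previous_keys - current_keys):
--         changes.append(f"- {key} (was {previous_tags[key]})")
--     for key in sorted(current_keys & previous_keys):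
--         if current_tags[key] != previous_tags[key]:
--             changes.append(f"~ {key}: {previous_tags[key]} -> {current_tags[key]}")
--     return changes
-- ===== SOURCE B (Python) =====
-- def diff_tags(previous_tags, current_tags):
--     if previous_tags is None:
--         return [f"+ {key}={value}" for key, value in sorted(current_tags.items())]
--
--     cur_keys = sorted(current_tags)
--     prev_keys = sorted(previous_tags)
--     added, removed, modified = [], [], []
--     i = j = 0
--     # two-pointer merge of the two sorted key sequences
--     while i < len(cur_keys) or j < len(prev_keys):
--         if j == len(prev_keys) or (i < len(cur_keys) and cur_keys[i] < prev_keys[j]):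
--             key = cur_keys[i]
--             added.append(f"+ {key}={current_tags[key]}")
--             i += 1
--         elif i == len(cur_keys) or prev_keys[j] < cur_keys[i]:
--             key = prev_keys[j]
--             removed.append(f"- {key} (was {previous_tags[key]})")
--             j += 1
--         else:
--             key = cur_keys[i]
--             if current_tags[key] != previous_tags[key]:
--                 modified.append(f"~ {key}: {previous_tags[key]} -> {current_tags[key]}")
--             i += 1
--             j += 1
--     return added + removed + modified
-- ===== Notes on version B (the rewrite author's own statement) =====
-- stated objective: alternative
-- what changed: A builds two key sets and walks three sorted set-difference/intersection lists with membership-style lookups; B sorts the two key lists once and classifies every key in a single two-pointer merge of the sorted sequences (added/removed/modified fall out of the merge order, no set operations or membership tests), then concatenates the three buckets.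
import Mathlib
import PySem

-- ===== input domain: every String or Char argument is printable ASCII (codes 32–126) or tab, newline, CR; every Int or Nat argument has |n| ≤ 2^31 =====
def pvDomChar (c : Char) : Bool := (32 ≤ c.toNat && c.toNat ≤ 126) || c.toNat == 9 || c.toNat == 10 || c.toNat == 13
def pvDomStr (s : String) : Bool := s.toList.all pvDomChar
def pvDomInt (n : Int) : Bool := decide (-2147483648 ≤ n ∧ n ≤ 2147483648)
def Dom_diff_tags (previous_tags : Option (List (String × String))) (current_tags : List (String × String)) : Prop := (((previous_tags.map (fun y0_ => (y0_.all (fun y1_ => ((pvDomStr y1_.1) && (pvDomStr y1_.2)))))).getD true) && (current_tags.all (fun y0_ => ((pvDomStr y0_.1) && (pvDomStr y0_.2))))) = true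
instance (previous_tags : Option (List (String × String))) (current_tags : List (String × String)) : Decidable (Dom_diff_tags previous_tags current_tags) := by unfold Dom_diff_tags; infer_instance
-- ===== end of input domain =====

-- B replaces A's set-difference/intersection passes by ONE two-pointer merge of the two sorted key
-- lists that classifies every key as added/removed/modified (objective: alternative algorithm, same cost).

-- Python d[key] on an association list representing a dict (unique keys; first match).
-- The default "" is never reached on the admitted inputs: every looked-up key is present.
def pvLookup (d : List (String × String)) (k : String) : String :=
  ((d.find? (fun p => p.1 == k)).map Prod.snd).getD ""

-- ===== PORT A =====
def diff_tags (previous_tags : Option (List (String × String))) (current_tags : List (String × String)) : List String :=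
  match previous_tags with
  | none =>
      (PySem.List.sorted2 current_tags Prod.fst Prod.snd).map (fun p => "+ " ++ p.1 ++ "=" ++ p.2)
  | some prev =>
      let previous_keys : PySem.Set String := PySem.Set.ofList (prev.map Prod.fst)
      let current_keys : PySem.Set String := PySem.Set.ofList (current_tags.map Prod.fst)
      let changes : List String := []
      let changes := (PySem.List.sorted (PySem.Set.diff current_keys previous_keys) (fun k => k)).foldl
        (fun acc k => acc ++ ["+ " ++ k ++ "=" ++ pvLookup current_tags k]) changes
      let changes := (PySem.List.sorted (PySem.Set.diff previous_keys current_keys) (fun k => k)).foldl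
        (fun acc k => acc ++ ["- " ++ k ++ " (was " ++ pvLookup prev k ++ ")"]) changes
      let changes := (PySem.List.sorted (PySem.Set.inter current_keys previous_keys) (fun k => k)).foldl
        (fun acc k => if pvLookup current_tags k != pvLookup prev k
          then acc ++ ["~ " ++ k ++ ": " ++ pvLookup prev k ++ " -> " ++ pvLookup current_tags k]
          else acc) changes
      changes

-- ===== PORT B =====
-- the while-loop of Source B: a two-pointer merge of the two sorted key lists, returning
-- (added, removed, modified); cur/prev are the dicts the loop body looks values up in
def pvMergeDiff (cur prev : List (String × String)) :
    List String → List String → List String × List String × List String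
  | ck :: ckt, pk :: pkt =>
      if ck < pk then
        let r := pvMergeDiff cur prev ckt (pk :: pkt)
        (("+ " ++ ck ++ "=" ++ pvLookup cur ck) :: r.1, r.2.1, r.2.2)
      else if pk < ck then
        let r := pvMergeDiff cur prev (ck :: ckt) pkt
        (r.1, ("- " ++ pk ++ " (was " ++ pvLookup prev pk ++ ")") :: r.2.1, r.2.2)
      else
        let r := pvMergeDiff cur prev ckt pkt
        (r.1, r.2.1,
          if pvLookup cur ck != pvLookup prev ck
          then ("~ " ++ ck ++ ": " ++ pvLookup prev ck ++ " -> " ++ pvLookup cur ck) :: r.2.2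
          else r.2.2)
  | ck :: ckt, [] =>
      let r := pvMergeDiff cur prev ckt []
      (("+ " ++ ck ++ "=" ++ pvLookup cur ck) :: r.1, r.2.1, r.2.2)
  | [], pk :: pkt =>
      let r := pvMergeDiff cur prev [] pkt
      (r.1, ("- " ++ pk ++ " (was " ++ pvLookup prev pk ++ ")") :: r.2.1, r.2.2)
  | [], [] => ([], [], [])
  termination_by kl pl => kl.length + pl.length

def diff_tags_alt (previous_tags : Option (List (String × String))) (current_tags : List (String × String)) : List String :=
  match previous_tags with
  | none =>
      (PySem.List.sorted2 current_tags Prod.fst Prod.snd).map (fun p => "+ " ++ p.1 ++ "=" ++ p.2)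
  | some prev =>
      let cur_keys := PySem.List.sorted (current_tags.map Prod.fst) (fun k => k)
      let prev_keys := PySem.List.sorted (prev.map Prod.fst) (fun k => k)
      let r := pvMergeDiff current_tags prev cur_keys prev_keys
      r.1 ++ r.2.1 ++ r.2.2

-- ===== PRECONDITION & SPEC =====
-- Pre_ excludes association lists with duplicate keys: a Python dict can never contain a duplicate
-- key, so such lists correspond to no input of the Python programs and their reading is ambiguous.
def Pre_diff_tags (previous_tags : Option (List (String × String))) (current_tags : List (String × String)) : Prop :=
  ((previous_tags.getD []).map Prod.fst).Nodup ∧ (current_tags.map Prod.fst).Nodup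
instance (previous_tags : Option (List (String × String))) (current_tags : List (String × String)) : Decidable (Pre_diff_tags previous_tags current_tags) := by unfold Pre_diff_tags; infer_instance

def pvWitness_diff_tags : (Option (List (String × String))) × (List (String × String)) :=
  (some [("name", "Minab"), ("amenity", "school")], [("name", "Minab Girls"), ("building", "yes")])

def Spec_diff_tags (previous_tags : Option (List (String × String))) (current_tags : List (String × String)) (out : List String) : Prop := out = diff_tags_alt previous_tags current_tags
instance (previous_tags : Option (List (String × String))) (current_tags : List (String × String)) (out : List String) : Decidable (Spec_diff_tags previous_tags current_tags out) := by unfold Spec_diff_tags; infer_instance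

-- ===== CLAIM (what is proved, stated in full; the proofs are below) =====
def Claim_equal_diff_tags : Prop := ∀ (previous_tags : Option (List (String × String))) (current_tags : List (String × String)), Dom_diff_tags previous_tags current_tags → Pre_diff_tags previous_tags current_tags → Spec_diff_tags previous_tags current_tags (diff_tags previous_tags current_tags)

-- ===== LEMMAS AND PROOFS =====

-- characterisation of the two-pointer merge on strictly increasing key lists
theorem pvMergeDiff_eq (cur prev : List (String × String)) :
    ∀ (kl pl : List String), kl.Pairwise (· < ·) → pl.Pairwise (· < ·) →
    pvMergeDiff cur prev kl pl =
      ((kl.filter (fun k => !pl.contains k)).map (fun k => "+ " ++ k ++ "=" ++ pvLookup cur k),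
       (pl.filter (fun k => !kl.contains k)).map (fun k => "- " ++ k ++ " (was " ++ pvLookup prev k ++ ")"),
       (kl.filter (fun k => pl.contains k && (pvLookup cur k != pvLookup prev k))).map
         (fun k => "~ " ++ k ++ ": " ++ pvLookup prev k ++ " -> " ++ pvLookup cur k)) := by
  intro kl pl
  induction kl, pl using pvMergeDiff.induct cur prev with
  | case1 ck ckt pk pkt hlt ih =>
    intro hk hp
    have hk' := (List.pairwise_cons.mp hk).2
    have hmemp : ∀ k ∈ pk :: pkt, ck < k := by
      intro k hkm
      rcases List.mem_cons.mp hkm with rfl | hkm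
      · exact hlt
      · exact lt_trans hlt ((List.pairwise_cons.mp hp).1 k hkm)
    have hnc : (pk :: pkt).contains ck = false := by
      simp only [List.contains_eq_mem, decide_eq_false_iff_not]
      intro hm; exact lt_irrefl ck (hmemp ck hm)
    simp only [pvMergeDiff, if_pos hlt, ih hk' hp, Prod.mk.injEq]
    refine ⟨?_, ?_, ?_⟩
    · rw [List.filter_cons, hnc]; simp
    · refine congrArg _ (List.filter_congr ?_)
      intro k hkm
      have hne : k ≠ ck := Ne.symm (ne_of_lt (hmemp k hkm))
      simp [List.contains_eq_mem, hne]
    · rw [List.filter_cons, hnc]; simp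
  | case2 ck ckt pk pkt hlt hlt2 ih =>
    intro hk hp
    have hp' := (List.pairwise_cons.mp hp).2
    have hmemk : ∀ k ∈ ck :: ckt, pk < k := by
      intro k hkm
      rcases List.mem_cons.mp hkm with rfl | hkm
      · exact hlt2
      · exact lt_trans hlt2 ((List.pairwise_cons.mp hk).1 k hkm)
    have hnc : (ck :: ckt).contains pk = false := by
      simp only [List.contains_eq_mem, decide_eq_false_iff_not]
      intro hm; exact lt_irrefl pk (hmemk pk hm)
    simp only [pvMergeDiff, if_neg hlt, if_pos hlt2, ih hk hp', Prod.mk.injEq]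
    refine ⟨?_, ?_, ?_⟩
    · refine congrArg _ (List.filter_congr ?_)
      intro k hkm
      have hne : k ≠ pk := Ne.symm (ne_of_lt (hmemk k hkm))
      simp [List.contains_eq_mem, hne]
    · rw [List.filter_cons, hnc]; simp
    · refine congrArg _ (List.filter_congr ?_)
      intro k hkm
      have hne : k ≠ pk := Ne.symm (ne_of_lt (hmemk k hkm))
      simp [List.contains_eq_mem, hne]
  | case3 ck ckt pk pkt hlt hlt2 ih =>
    intro hk hp
    have heq : ck = pk := le_antisymm (not_lt.mp hlt2) (not_lt.mp hlt)
    subst heq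
    have hk' := (List.pairwise_cons.mp hk).2
    have hp' := (List.pairwise_cons.mp hp).2
    have htailk : ∀ k ∈ ckt, ck < k := (List.pairwise_cons.mp hk).1
    have htailp : ∀ k ∈ pkt, ck < k := (List.pairwise_cons.mp hp).1
    have hself : (ck :: pkt).contains ck = true := by simp
    have hselfk : (ck :: ckt).contains ck = true := by simp
    simp only [pvMergeDiff, if_neg hlt, ih hk' hp', Prod.mk.injEq]
    refine ⟨?_, ?_, ?_⟩
    · rw [List.filter_cons, hself]
      simp only [Bool.not_true]
      rw [if_neg (by simp)]
      refine congrArg _ (List.filter_congr ?_)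
      intro k hkm
      have hne : k ≠ ck := Ne.symm (ne_of_lt (htailk k hkm))
      simp [List.contains_eq_mem, hne]
    · rw [List.filter_cons, hselfk]
      simp only [Bool.not_true]
      rw [if_neg (by simp)]
      refine congrArg _ (List.filter_congr ?_)
      intro k hkm
      have hne : k ≠ ck := Ne.symm (ne_of_lt (htailp k hkm))
      simp [List.contains_eq_mem, hne]
    · rw [List.filter_cons, hself]
      simp only [Bool.true_and]
      have htl : List.filter (fun k => pkt.contains k && (pvLookup cur k != pvLookup prev k)) ckt
          = List.filter (fun k => (ck :: pkt).contains k && (pvLookup cur k != pvLookup prev k)) ckt := by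
        refine List.filter_congr ?_
        intro k hkm
        have hne : k ≠ ck := Ne.symm (ne_of_lt (htailk k hkm))
        simp [List.contains_eq_mem, hne]
      by_cases hv : (pvLookup cur ck != pvLookup prev ck) = true
      · rw [if_pos hv, hv, if_pos rfl, List.map_cons, htl]
      · rw [if_neg hv, eq_false_of_ne_true hv, if_neg (by simp), htl]
  | case4 ck ckt ih =>
    intro hk _
    simp [pvMergeDiff, ih (List.pairwise_cons.mp hk).2 List.Pairwise.nil]
  | case5 pk pkt ih =>
    intro _ hp
    simp [pvMergeDiff, ih List.Pairwise.nil (List.pairwise_cons.mp hp).2]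
  | case6 =>
    intro _ _
    simp [pvMergeDiff]

-- sorting a nodup list of strings gives a strictly increasing list
theorem sorted_pairwise_lt (l : List String) (h : l.Nodup) :
    (PySem.List.sorted l (fun k => k)).Pairwise (· < ·) := by
  have h1 := PySem.List.sorted_pairwise l (fun k => k)
  have h2 : (PySem.List.sorted l (fun k => k)).Nodup :=
    (PySem.List.sorted_perm l (fun k => k) false).nodup_iff.mpr h
  exact (h1.and h2).imp (fun {a b} hab => lt_of_le_of_ne hab.1 (by simpa using hab.2))

-- filtering commutes with sorting on a nodup list of strings
theorem sorted_filter_comm (l : List String) (h : l.Nodup) (p : String → Bool) :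
    PySem.List.sorted (l.filter p) (fun k => k)
      = (PySem.List.sorted l (fun k => k)).filter p :=
  PySem.List.sorted_eq_of_perm_of_pairwise_lt _ _ _
    ((PySem.List.sorted_perm l (fun k => k) false).filter p)
    (List.Pairwise.sublist List.filter_sublist (sorted_pairwise_lt l h))

-- membership in a sorted list is membership in the list
theorem contains_sorted (l : List String) (k : String) :
    (PySem.List.sorted l (fun x => x)).contains k = l.contains k := by
  simp [List.contains_eq_mem, PySem.List.mem_sorted]

theorem diff_tags_eq (previous_tags : Option (List (String × String))) (current_tags : List (String × String))
    (hpre : Pre_diff_tags previous_tags current_tags) :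
    diff_tags previous_tags current_tags = diff_tags_alt previous_tags current_tags := by
  obtain ⟨hp, hc⟩ := hpre
  match previous_tags with
  | none => rfl
  | some prev =>
    simp only [Option.getD] at hp
    have hofp : PySem.Set.ofList (prev.map Prod.fst) = prev.map Prod.fst :=
      PySem.Set.ofList_eq_self_of_nodup _ hp
    have hofc : PySem.Set.ofList (current_tags.map Prod.fst) = current_tags.map Prod.fst :=
      PySem.Set.ofList_eq_self_of_nodup _ hc
    have hmerge := pvMergeDiff_eq current_tags prev
      (PySem.List.sorted (current_tags.map Prod.fst) (fun k => k))
      (PySem.List.sorted (prev.map Prod.fst) (fun k => k))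
      (sorted_pairwise_lt _ hc) (sorted_pairwise_lt _ hp)
    -- rewrite the merge's filters over sorted lists into sorted filters over the key lists
    have hAdd : ((PySem.List.sorted (current_tags.map Prod.fst) (fun k => k)).filter
          (fun k => !(PySem.List.sorted (prev.map Prod.fst) (fun x => x)).contains k))
        = PySem.List.sorted ((current_tags.map Prod.fst).filter (fun k => !(prev.map Prod.fst).contains k)) (fun k => k) := by
      rw [sorted_filter_comm _ hc]
      exact (List.filter_congr (fun k _ => by rw [contains_sorted])).symm
    have hRem : ((PySem.List.sorted (prev.map Prod.fst) (fun k => k)).filter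
          (fun k => !(PySem.List.sorted (current_tags.map Prod.fst) (fun x => x)).contains k))
        = PySem.List.sorted ((prev.map Prod.fst).filter (fun k => !(current_tags.map Prod.fst).contains k)) (fun k => k) := by
      rw [sorted_filter_comm _ hp]
      exact (List.filter_congr (fun k _ => by rw [contains_sorted])).symm
    have hMod : ((PySem.List.sorted (current_tags.map Prod.fst) (fun k => k)).filter
          (fun k => (PySem.List.sorted (prev.map Prod.fst) (fun x => x)).contains k
            && (pvLookup current_tags k != pvLookup prev k)))
        = (PySem.List.sorted ((current_tags.map Prod.fst).filter (fun k => (prev.map Prod.fst).contains k)) (fun k => k)).filter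
            (fun k => pvLookup current_tags k != pvLookup prev k) := by
      rw [sorted_filter_comm _ hc, List.filter_filter]
      exact (List.filter_congr (fun k _ => by rw [contains_sorted, Bool.and_comm])).symm
    simp only [diff_tags, diff_tags_alt, hofp, hofc, PySem.Set.diff, PySem.Set.inter,
      PySem.Set.contains, hmerge, hAdd, hRem, hMod, List.nil_append,
      PySem.List.foldl_append_singleton_eq_map, PySem.List.foldl_append_if,
      List.append_assoc]

-- ===== VERDICT (by name: the statement is the Claim_ definition above) =====
theorem diff_tags_spec : Claim_equal_diff_tags := by
  intro previous_tags current_tags _ hpre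
  exact diff_tags_eq previous_tags current_tags hpre
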